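-- pv_equiv track=rewrite | github.com/maksverver/AdventOfCode | 2022/day18/gen.py | CheckerBoard
-- ===== SOURCE A (Python) =====
-- def CheckerBoard(size):
--   points = set()
--   for x in range(size):
--     for y in range(size):
--       for z in range(size):
--         if (x + y + z) % 2 == 0:
--           points.add((x, y, z))
--   return points
-- ===== SOURCE B (Python) =====
-- def CheckerBoard(size):
--   area = size * size
--   points = set()
--   for i in range(area * size):
--     x, rest = divmod(i, area)
--     y, z = divmod(rest, size)
--     if (x + y + z) % 2 == 0:
--       points.add((x, y, z))
--   return points
-- ===== Notes on version B (the rewrite author's own statement) =====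
-- stated objective: alternative
-- what changed: A's three nested x/y/z loops are replaced by one flat loop over a single counter i in range(size**3) that recovers (x, y, z) with two divmods; same O(n^3) cost, different control structure.
import Mathlib
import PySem

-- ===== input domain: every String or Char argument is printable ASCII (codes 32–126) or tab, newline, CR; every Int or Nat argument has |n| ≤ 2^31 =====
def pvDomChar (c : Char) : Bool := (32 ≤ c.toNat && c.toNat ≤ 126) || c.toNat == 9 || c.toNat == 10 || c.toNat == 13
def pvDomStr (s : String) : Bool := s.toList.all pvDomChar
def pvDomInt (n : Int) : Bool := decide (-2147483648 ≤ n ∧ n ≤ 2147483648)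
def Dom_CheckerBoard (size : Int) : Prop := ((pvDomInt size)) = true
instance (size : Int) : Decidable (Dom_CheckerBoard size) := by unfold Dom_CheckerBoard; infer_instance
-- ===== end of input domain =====

-- B flattens A's three nested loops into ONE loop over a single counter i in range(size^3),
-- recovering (x, y, z) by two divmods (alternative decomposition; same O(n^3) cost).

-- ===== PORT A =====
def CheckerBoard (size : Int) : List (Int × Int × Int) :=
  (PySem.List.pyRange 0 size 1).foldl (fun points x =>
    (PySem.List.pyRange 0 size 1).foldl (fun points y =>
      (PySem.List.pyRange 0 size 1).foldl (fun points z =>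
        if PySem.Int.mod (x + y + z) 2 == 0 then PySem.Set.add points (x, y, z) else points)
        points) points) PySem.Set.empty

-- ===== PORT B =====
-- divmod? is none only for a zero divisor; inside a nonempty range area ≠ 0 and size ≠ 0,
-- so the 'none => points' arms are unreachable totalization guards (Python's divmod never raises here).
def CheckerBoard_alt (size : Int) : List (Int × Int × Int) :=
  let area := size * size
  (PySem.List.pyRange 0 (area * size) 1).foldl (fun points i =>
    match PySem.Int.divmod? i area with
    | none => points
    | some (x, rest) =>
      match PySem.Int.divmod? rest size with
      | none => points
      | some (y, z) =>
        if PySem.Int.mod (x + y + z) 2 == 0 then PySem.Set.add points (x, y, z) else points)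
    PySem.Set.empty

-- ===== PRECONDITION & SPEC =====
def Spec_CheckerBoard (size : Int) (out : List (Int × Int × Int)) : Prop := out = CheckerBoard_alt size
instance (size : Int) (out : List (Int × Int × Int)) : Decidable (Spec_CheckerBoard size out) := by unfold Spec_CheckerBoard; infer_instance

-- ===== CLAIM (what is proved, stated in full; the proofs are below) =====
def Claim_equal_CheckerBoard : Prop := ∀ (size : Int), Dom_CheckerBoard size → Spec_CheckerBoard size (CheckerBoard size)

-- ===== LEMMAS AND PROOFS =====

-- range(a*b) pushed through a map is the nested enumeration q = i div b, r = i mod b.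
lemma pv_range_mul {γ : Type} (a b : Nat) (g : Nat → γ) :
    (List.range (a*b)).map g
      = (List.range a).flatMap (fun q => (List.range b).map (fun r => g (b*q + r))) := by
  induction a with
  | zero => simp
  | succ a ih =>
    rw [Nat.succ_mul, List.range_add, List.map_append, ih, List.range_succ,
      List.flatMap_append]
    simp [Nat.mul_comm, Function.comp_def]

-- A single fold over range(s^3) with the two-divmod decode equals the triple nested fold.
lemma pv_decode {β : Type} (s : Nat) (f : β → Int → Int → Int → β) (init : β) :
    (List.range (s*s*s)).foldl
        (fun pts i => f pts ((i/(s*s) : Nat) : Int) ((i%(s*s)/s : Nat) : Int) ((i%(s*s)%s : Nat) : Int)) init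
      = (List.range s).foldl (fun pts (x : Nat) =>
          (List.range s).foldl (fun pts (y : Nat) =>
            (List.range s).foldl (fun pts (z : Nat) => f pts (x:Int) (y:Int) (z:Int)) pts) pts) init := by
  have h1 : s*s*s = s*(s*s) := by ring
  rw [h1, ← List.foldl_map
    (f := fun i => (((i/(s*s) : Nat) : Int), ((i%(s*s)/s : Nat) : Int), ((i%(s*s)%s : Nat) : Int)))
    (g := fun pts p => f pts p.1 p.2.1 p.2.2),
    pv_range_mul, List.foldl_flatMap]
  refine PySem.List.foldl_congr_mem _ _ _ _ ?_
  intro pts x _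
  have hmap : (List.range (s*s)).map
      (fun r => ((((s*s*x + r)/(s*s) : Nat) : Int), (((s*s*x + r)%(s*s)/s : Nat) : Int), (((s*s*x + r)%(s*s)%s : Nat) : Int)))
      = (List.range (s*s)).map (fun r => ((x : Int), ((r/s : Nat) : Int), ((r%s : Nat) : Int))) := by
    refine List.map_congr_left ?_
    intro r hr
    rw [List.mem_range] at hr
    have hs : 0 < s*s := by omega
    have h2 : (s*s*x + r)/(s*s) = x := by
      rw [Nat.mul_add_div hs, Nat.div_eq_of_lt hr, Nat.add_zero]
    have h3 : (s*s*x + r)%(s*s) = r := by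
      rw [Nat.mul_add_mod_self_left, Nat.mod_eq_of_lt hr]
    rw [h2, h3]
  rw [hmap, pv_range_mul s s, List.foldl_flatMap]
  refine PySem.List.foldl_congr_mem _ _ _ _ ?_
  intro pts' y _
  have hmap2 : (List.range s).map
      (fun r => ((x : Int), (((s*y + r)/s : Nat) : Int), (((s*y + r)%s : Nat) : Int)))
      = (List.range s).map (fun (z : Nat) => ((x : Int), (y : Int), (z : Int))) := by
    refine List.map_congr_left ?_
    intro z hz
    rw [List.mem_range] at hz
    have h2 : (s*y + z)/s = y := by
      rw [Nat.mul_add_div (by omega), Nat.div_eq_of_lt hz, Nat.add_zero]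
    have h3 : (s*y + z)%s = z := by
      rw [Nat.mul_add_mod_self_left, Nat.mod_eq_of_lt hz]
    rw [h2, h3]
  rw [hmap2, List.foldl_map]

lemma pv_pyRange_nonpos (b : Int) (h : b ≤ 0) : PySem.List.pyRange 0 b 1 = [] := by
  unfold PySem.List.pyRange
  simp
  omega

-- ===== VERDICT (by name: the statement is the Claim_ definition above) =====
theorem CheckerBoard_spec : Claim_equal_CheckerBoard := by
  intro size _
  unfold Spec_CheckerBoard
  simp only [CheckerBoard, CheckerBoard_alt]
  by_cases hpos : 0 < size
  · obtain ⟨s, hs⟩ : ∃ s : Nat, size = (s : Int) := ⟨size.toNat, (Int.toNat_of_nonneg hpos.le).symm⟩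
    subst hs
    have hs0 : 0 < s := by exact_mod_cast hpos
    have hcube : ((s*s : Nat) : Int) * (s:Int) = ((s*s*s : Nat) : Int) := by push_cast; ring
    have harea : ((s:Int) * s) = ((s*s : Nat) : Int) := by push_cast; ring
    simp only [harea, hcube, PySem.List.pyRange_zero_natCast, List.foldl_map]
    refine Eq.trans (pv_decode s
        (fun pts x y z => if PySem.Int.mod (x+y+z) 2 == 0 then PySem.Set.add pts (x,y,z) else pts)
        PySem.Set.empty).symm ?_
    refine PySem.List.foldl_congr_mem _ _ _ _ ?_
    intro pts i _
    have hb : ((s*s : Nat) : Int) ≠ 0 := by positivity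
    have hb2 : ((s : Nat) : Int) ≠ 0 := by positivity
    simp only [PySem.Int.divmod?, hb, hb2, if_false, ← Int.ofNat_fdiv, ← Int.ofNat_fmod]
  · replace hpos : size ≤ 0 := by omega
    have h3 : size * size * size ≤ 0 := by nlinarith
    rw [pv_pyRange_nonpos size hpos, pv_pyRange_nonpos _ h3]
    rfl
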